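-- pv_equiv track=rewrite | github.com/olearyshane7/Command-Repo | LHC/equipment values.py | generate_values_for_group
-- ===== SOURCE A (Python) =====
-- def generate_values_for_group(group):
--     values = {}
--
--     for member in group:
--         if member == "LHC Group":
--             router_value = "GFLEX-1000-4C8R-LTE"
--             access_point_value = None
--             switch_value = None
--             switch_value2 = None
--         elif member == "Western Shamrock":
--             router_value = "GFLEX-1000-4C8R-LTE"
--             access_point_value = "AP33-US"
--             switch_value = "EX2300-C-12P"
--             switch_value2 = "EX2300-24P"
--         else:
--             router_value = None
--             access_point_value = None
--             switch_value = None
--             switch_value2 = None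
--
--         values[member] = {
--             "Router": router_value,
--             "Access Point": access_point_value,
--             "Switch": switch_value,
--             "Switch2": switch_value2
--         }
--
--     return values
-- ===== SOURCE B (Python) =====
-- _FIELDS = ("Router", "Access Point", "Switch", "Switch2")
-- # sparse catalogue: only the fields that differ from None are stored
-- _OVERRIDES = (
--     ("LHC Group", (("Router", "GFLEX-1000-4C8R-LTE"),)),
--     ("Western Shamrock", (("Router", "GFLEX-1000-4C8R-LTE"), ("Access Point", "AP33-US"),
--                           ("Switch", "EX2300-C-12P"), ("Switch2", "EX2300-24P"))),
-- )
--
--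
-- def generate_values_for_group(group):
--     # pass 1: every member gets the all-None row
--     values = {m: dict.fromkeys(_FIELDS) for m in group}
--     # pass 2: patch the recognized members, iterating over the catalogue (not the group)
--     for name, overrides in _OVERRIDES:
--         if name in values:
--             values[name].update(overrides)
--     return values
-- ===== Notes on version B (the rewrite author's own statement) =====
-- stated objective: alternative
-- what changed: Replaces A's per-member if/elif/else chain (full row rebuilt inline for every member) with a two-stage algorithm: first every member is mapped to the all-None row, then a second loop over a sparse override catalogue (not over the group) patches the recognized members' rows in place.
import Mathlib
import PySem

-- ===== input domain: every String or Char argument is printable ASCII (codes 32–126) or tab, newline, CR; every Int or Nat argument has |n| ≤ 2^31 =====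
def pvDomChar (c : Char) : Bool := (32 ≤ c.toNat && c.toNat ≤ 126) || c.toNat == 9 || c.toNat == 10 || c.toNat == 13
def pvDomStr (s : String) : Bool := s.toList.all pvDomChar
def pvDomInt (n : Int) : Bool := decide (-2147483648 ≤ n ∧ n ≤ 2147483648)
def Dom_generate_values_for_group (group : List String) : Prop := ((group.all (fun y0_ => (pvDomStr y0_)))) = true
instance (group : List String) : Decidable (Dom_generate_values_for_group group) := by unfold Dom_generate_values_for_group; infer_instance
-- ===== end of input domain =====

-- B replaces A's per-member if/elif/else chain by a two-stage algorithm: every member first gets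
-- the all-None row, then a second loop over a sparse override catalogue patches the recognized
-- members' rows in place (objective: alternative decomposition, same cost).

-- ===== PORT A =====
def generate_values_for_group (group : List String) : List (String × List (String × Option String)) :=
  (group.foldl (fun values member =>
      -- the if/elif/else chain sets the four variables; here as a 4-tuple
      let t : Option String × Option String × Option String × Option String :=
        if member == "LHC Group" then
          (some "GFLEX-1000-4C8R-LTE", none, none, none)
        else if member == "Western Shamrock" then
          (some "GFLEX-1000-4C8R-LTE", some "AP33-US", some "EX2300-C-12P", some "EX2300-24P")
        else
          (none, none, none, none)
      values.insert member
        [("Router", t.1), ("Access Point", t.2.1), ("Switch", t.2.2.1), ("Switch2", t.2.2.2)])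
    PySem.Dict.empty).items

-- ===== PORT B =====
def pvFields : List String := ["Router", "Access Point", "Switch", "Switch2"]

-- the sparse override catalogue: only non-None fields are stored
def pvOverrides : List (String × List (String × String)) :=
  [("LHC Group", [("Router", "GFLEX-1000-4C8R-LTE")]),
   ("Western Shamrock",
    [("Router", "GFLEX-1000-4C8R-LTE"), ("Access Point", "AP33-US"),
     ("Switch", "EX2300-C-12P"), ("Switch2", "EX2300-24P")])]

-- pass 1 is the dict comprehension {m: dict.fromkeys(_FIELDS) for m in group};
-- pass 2 is 'for name, overrides in _OVERRIDES: if name in values: values[name].update(overrides)'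
-- ('values[name].update(...)' patches the row dict in place = Dict.modify with Dict.update)
def generate_values_for_group_alt (group : List String) : List (String × List (String × Option String)) :=
  let values : PySem.Dict String (PySem.Dict String (Option String)) :=
    group.foldl (fun v m =>
      v.insert m (PySem.Dict.ofList (pvFields.map (fun f => (f, (none : Option String)))))) PySem.Dict.empty
  let values := pvOverrides.foldl (fun v p =>
    if v.contains p.1 then
      v.modify p.1 PySem.Dict.empty (fun row => row.update (p.2.map (fun q => (q.1, some q.2))))
    else v) values
  values.items.map (fun p => (p.1, p.2.items))

-- ===== PRECONDITION & SPEC =====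
def Spec_generate_values_for_group (group : List String) (out : List (String × List (String × Option String))) : Prop := out = generate_values_for_group_alt group
instance (group : List String) (out : List (String × List (String × Option String))) : Decidable (Spec_generate_values_for_group group out) := by unfold Spec_generate_values_for_group; infer_instance

-- ===== CLAIM (what is proved, stated in full; the proofs are below) =====
def Claim_equal_generate_values_for_group : Prop := ∀ (group : List String), Dom_generate_values_for_group group → Spec_generate_values_for_group group (generate_values_for_group group)

-- ===== LEMMAS AND PROOFS =====

-- the row A's loop body associates with a member (value depends only on the key)
def pvRowA (m : String) : List (String × Option String) :=
  let t : Option String × Option String × Option String × Option String :=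
    if m == "LHC Group" then
      (some "GFLEX-1000-4C8R-LTE", none, none, none)
    else if m == "Western Shamrock" then
      (some "GFLEX-1000-4C8R-LTE", some "AP33-US", some "EX2300-C-12P", some "EX2300-24P")
    else
      (none, none, none, none)
  [("Router", t.1), ("Access Point", t.2.1), ("Switch", t.2.2.1), ("Switch2", t.2.2.2)]

-- the all-None row of B's pass 1
def pvDefRow : PySem.Dict String (Option String) :=
  PySem.Dict.ofList (pvFields.map (fun f => (f, (none : Option String))))

-- one step of B's pass 2
def pvStep (v : PySem.Dict String (PySem.Dict String (Option String)))
    (p : String × List (String × String)) : PySem.Dict String (PySem.Dict String (Option String)) :=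
  if v.contains p.1 then
    v.modify p.1 PySem.Dict.empty (fun row => row.update (p.2.map (fun q => (q.1, some q.2))))
  else v

theorem pv_keys_step (v : PySem.Dict String (PySem.Dict String (Option String)))
    (p : String × List (String × String)) : (pvStep v p).keys = v.keys := by
  unfold pvStep
  by_cases hc : v.contains p.1
  · rw [if_pos hc, PySem.Dict.keys_modify, PySem.Dict.keys_insert_of_contains _ _ hc]
  · rw [if_neg hc]

theorem pv_getD_step (v : PySem.Dict String (PySem.Dict String (Option String)))
    (p : String × List (String × String)) (k : String) :
    (pvStep v p).getD k PySem.Dict.empty =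
      if k = p.1 ∧ v.contains p.1 = true then
        (v.getD p.1 PySem.Dict.empty).update (p.2.map (fun q => (q.1, some q.2)))
      else v.getD k PySem.Dict.empty := by
  unfold pvStep
  by_cases hc : v.contains p.1
  · rw [if_pos hc, PySem.Dict.getD_modify]
    by_cases hk : k = p.1
    · simp [hk, hc]
    · simp [hk, hc]
  · simp [hc]

-- the final lookup of A's / B's pass-1 insert loop: last insert at k wins
theorem pv_getD_fold {ν : Type} (group : List String) (d : PySem.Dict String ν)
    (f : String → ν) (k : String) (d0 : ν) :
    (group.foldl (fun v m => v.insert m (f m)) d).getD k d0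
      = if k ∈ group then f k else d.getD k d0 := by
  induction group generalizing d with
  | nil => simp
  | cons x xs ih =>
      simp only [List.foldl_cons, ih, List.mem_cons]
      by_cases hk : k ∈ xs
      · simp [hk]
      · by_cases hx : k = x
        · subst hx; simp [hk, PySem.Dict.getD_insert_self]
        · simp [hk, hx, PySem.Dict.getD_insert]

theorem pv_fold_A_eq (group : List String) :
    group.foldl (fun values member =>
      let t : Option String × Option String × Option String × Option String :=
        if member == "LHC Group" then
          (some "GFLEX-1000-4C8R-LTE", none, none, none)
        else if member == "Western Shamrock" then
          (some "GFLEX-1000-4C8R-LTE", some "AP33-US", some "EX2300-C-12P", some "EX2300-24P")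
        else
          (none, none, none, none)
      values.insert member
        [("Router", t.1), ("Access Point", t.2.1), ("Switch", t.2.2.1), ("Switch2", t.2.2.2)])
      PySem.Dict.empty
    = group.foldl (fun v m => v.insert m (pvRowA m)) PySem.Dict.empty := rfl

-- the row B's two passes leave at a member k of the group equals A's row for k
theorem pv_row_B_eq (group : List String) (k : String) (hk : k ∈ group) :
    ((pvOverrides.foldl pvStep
        (group.foldl (fun v m => v.insert m pvDefRow) PySem.Dict.empty)).getD k PySem.Dict.empty).items
      = pvRowA k := by
  have hD1 : ∀ (j : String), j ∈ group →
      (group.foldl (fun v m => v.insert m pvDefRow) PySem.Dict.empty).getD j PySem.Dict.empty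
        = pvDefRow := by
    intro j hj
    rw [pv_getD_fold group PySem.Dict.empty (fun _ => pvDefRow) j PySem.Dict.empty, if_pos hj]
  have hkeysD1 : (group.foldl (fun v m => v.insert m pvDefRow) PySem.Dict.empty).keys
      = PySem.List.dedup group := by
    rw [PySem.Dict.keys_foldl_insert]
    simp [PySem.Dict.keys_empty, PySem.Set.update_nil_left]
  have hcontD1 : ∀ (j : String), j ∈ group →
      (group.foldl (fun v m => v.insert m pvDefRow) PySem.Dict.empty).contains j = true := by
    intro j hj
    rw [PySem.Dict.contains_eq_decide_mem_keys, hkeysD1]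
    simp [hj]
  set D1 := group.foldl (fun v m => v.insert m pvDefRow) PySem.Dict.empty with hD1def
  have hfold : pvOverrides.foldl pvStep D1
      = pvStep (pvStep D1 ("LHC Group", [("Router", "GFLEX-1000-4C8R-LTE")]))
          ("Western Shamrock",
           [("Router", "GFLEX-1000-4C8R-LTE"), ("Access Point", "AP33-US"),
            ("Switch", "EX2300-C-12P"), ("Switch2", "EX2300-24P")]) := rfl
  have hcont2 : (pvStep D1 ("LHC Group", [("Router", "GFLEX-1000-4C8R-LTE")])).contains
      "Western Shamrock" = D1.contains "Western Shamrock" := by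
    rw [PySem.Dict.contains_eq_decide_mem_keys, PySem.Dict.contains_eq_decide_mem_keys, pv_keys_step]
  rw [hfold, pv_getD_step]
  by_cases hL : k = "LHC Group"
  · -- step 1 hits k; step 2 is at a different key (or skipped)
    have hc1 : D1.contains "LHC Group" = true := hcontD1 _ (hL ▸ hk)
    have hne : ¬ (k = "Western Shamrock") := by subst hL; decide
    rw [if_neg (by simp [hne]), pv_getD_step, if_pos (by simp [hL, hc1])]
    have hg : D1.getD (("LHC Group", [("Router", "GFLEX-1000-4C8R-LTE")]) :
        String × List (String × String)).1 PySem.Dict.empty = pvDefRow := hD1 _ (hL ▸ hk)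
    rw [hg]
    subst hL; decide
  · by_cases hW : k = "Western Shamrock"
    · -- step 1 is at a different key; step 2 hits k
      have hc2 : D1.contains "Western Shamrock" = true := hcontD1 _ (hW ▸ hk)
      rw [if_pos (by simp [hW, hcont2, hc2]), pv_getD_step, if_neg (by simp)]
      have hg : D1.getD (("Western Shamrock",
          [("Router", "GFLEX-1000-4C8R-LTE"), ("Access Point", "AP33-US"),
           ("Switch", "EX2300-C-12P"), ("Switch2", "EX2300-24P")]) :
          String × List (String × String)).1 PySem.Dict.empty = pvDefRow := hD1 _ (hW ▸ hk)
      rw [hg]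
      subst hW; decide
    · -- both steps at other keys: the all-None row survives
      rw [if_neg (by simp [hW]), pv_getD_step, if_neg (by simp [hL]), hD1 _ hk]
      have h1 : (k == "LHC Group") = false := by simp [hL]
      have h2 : (k == "Western Shamrock") = false := by simp [hW]
      simp only [pvRowA, h1, h2]
      decide

-- ===== VERDICT (by name: the statement is the Claim_ definition above) =====
theorem generate_values_for_group_spec : Claim_equal_generate_values_for_group := by
  intro group _
  unfold Spec_generate_values_for_group generate_values_for_group generate_values_for_group_alt
  rw [pv_fold_A_eq]
  -- A's side: items of the insert loop = rows at the deduplicated members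
  have hndA : (group.foldl (fun v m => v.insert m (pvRowA m)) PySem.Dict.empty).keys.Nodup :=
    PySem.Dict.nodup_keys_foldl_insert group _ _ PySem.Dict.nodup_keys_empty
  rw [PySem.Dict.items_eq_map_keys _ hndA [], PySem.Dict.keys_foldl_insert]
  have hkeysA : PySem.Set.update (PySem.Dict.empty (κ := String)
      (ν := List (String × Option String))).keys group = PySem.List.dedup group := by
    simp [PySem.Dict.keys_empty, PySem.Set.update_nil_left]
  rw [hkeysA]
  -- B's side: keys survive pass 2 unchanged
  have hndB : (group.foldl (fun v m => v.insert m pvDefRow) PySem.Dict.empty).keys.Nodup :=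
    PySem.Dict.nodup_keys_foldl_insert group _ _ PySem.Dict.nodup_keys_empty
  have hkeysB : (group.foldl (fun v m => v.insert m pvDefRow) PySem.Dict.empty).keys
      = PySem.List.dedup group := by
    rw [PySem.Dict.keys_foldl_insert]
    simp [PySem.Dict.keys_empty, PySem.Set.update_nil_left]
  have hfoldB : ∀ d, pvOverrides.foldl (fun v p =>
      if v.contains p.1 then
        v.modify p.1 PySem.Dict.empty (fun row => row.update (p.2.map (fun q => (q.1, some q.2))))
      else v) d = pvOverrides.foldl pvStep d := by
    intro d; rfl
  show _ = ((pvOverrides.foldl _ (group.foldl (fun v m => v.insert m pvDefRow) PySem.Dict.empty)).items).map _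
  rw [hfoldB]
  have hkeys2 : (pvOverrides.foldl pvStep
      (group.foldl (fun v m => v.insert m pvDefRow) PySem.Dict.empty)).keys = PySem.List.dedup group := by
    rw [show pvOverrides.foldl pvStep
        (group.foldl (fun v m => v.insert m pvDefRow) PySem.Dict.empty)
        = pvStep (pvStep (group.foldl (fun v m => v.insert m pvDefRow) PySem.Dict.empty)
            pvOverrides[0]!) pvOverrides[1]! from rfl,
        pv_keys_step, pv_keys_step, hkeysB]
  rw [PySem.Dict.items_eq_map_keys _ (hkeys2 ▸ (hkeysB ▸ hndB)) PySem.Dict.empty, hkeys2,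
      List.map_map]
  apply List.map_congr_left
  intro k hkmem
  have hk : k ∈ group := (PySem.List.mem_dedup group k).1 hkmem
  rw [pv_getD_fold, if_pos hk]
  simp only [Function.comp]
  rw [pv_row_B_eq group k hk]
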